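-- pv_equiv track=rewrite | github.com/shanto268/scattering_absorption_analysis | analyze.py | return_last_mu_index
-- ===== SOURCE A (Python) =====
-- def return_last_mu_index(R1_four):
--     indexes = []
--     for row in range(len(R1_four['mu_id'])):
--         j = row+1
--         if j < len(R1_four['mu_id']):
--             if R1_four['mu_id'][row] != R1_four['mu_id'][j]:
--                 indexes.append(R1_four['index'][row])
--         if row ==(len(R1_four['mu_id'])-1):
--             indexes.append(R1_four['index'][row])
--     return indexes
-- ===== SOURCE B (Python) =====
-- def return_last_mu_index(R1_four):
--     mu = R1_four['mu_id']
--     if not mu: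
--         return []
--     idx = R1_four['index']
--     out = []
--     pos = 0
--     n = len(mu)
--     while pos < n:
--         # advance to the end of the maximal run of values equal to mu[pos]
--         end = pos
--         while end + 1 < n and mu[end + 1] == mu[pos]:
--             end += 1
--         out.append(idx[end])
--         pos = end + 1
--     return out
-- ===== Notes on version B (the rewrite author's own statement) =====
-- stated objective: alternative
-- what changed: A scans every row, comparing each mu_id with its successor and special-casing the last row; B instead iterates over maximal runs of equal mu_id values (inner loop skips to the end of each run) and emits the index at each run end, with no last-row special case.
import Mathlib
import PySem

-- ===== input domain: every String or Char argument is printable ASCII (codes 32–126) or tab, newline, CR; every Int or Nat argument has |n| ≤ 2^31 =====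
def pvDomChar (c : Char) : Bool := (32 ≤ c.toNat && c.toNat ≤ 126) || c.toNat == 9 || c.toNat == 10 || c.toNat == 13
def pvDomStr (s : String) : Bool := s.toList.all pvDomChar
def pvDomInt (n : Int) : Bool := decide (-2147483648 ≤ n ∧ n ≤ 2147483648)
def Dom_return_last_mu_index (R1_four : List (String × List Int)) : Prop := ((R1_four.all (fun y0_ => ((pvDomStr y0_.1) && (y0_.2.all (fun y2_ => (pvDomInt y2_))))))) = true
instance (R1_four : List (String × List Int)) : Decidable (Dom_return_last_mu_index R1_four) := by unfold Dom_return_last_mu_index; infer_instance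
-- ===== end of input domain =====

-- B replaces A's per-row loop (with its separate last-row special case) by an outer loop over
-- maximal runs of equal mu_id values, emitting the index at the end of each run; objective:
-- alternative decomposition, same linear cost.

-- ===== PORT A =====
-- loop body of A: the two ifs appending to indexes, for one row
def aBody (mu idx : List Int) (indexes : List Int) (row : Int) : List Int :=
  let j := row + 1
  let indexes :=
    if j < (mu.length : Int) then
      if PySem.List.pyGetD mu row 0 ≠ PySem.List.pyGetD mu j 0 then
        indexes ++ [PySem.List.pyGetD idx row 0]
      else indexes
    else indexes
  if row = (mu.length : Int) - 1 then indexes ++ [PySem.List.pyGetD idx row 0]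
  else indexes

def return_last_mu_index (R1_four : List (String × List Int)) : List Int :=
  let mu := (R1_four.lookup "mu_id").getD []
  let idx := (R1_four.lookup "index").getD []
  (PySem.List.pyRange 0 (mu.length : Int) 1).foldl (aBody mu idx) []

-- ===== PORT B =====
-- inner while loop of Source B: while end+1 < n and mu[end+1] == mu[pos]: end += 1
def runEnd (mu : List Int) (pos e : Nat) : Nat :=
  if h : e + 1 < mu.length ∧ mu.getD (e + 1) 0 = mu.getD pos 0 then runEnd mu pos (e + 1)
  else e
termination_by mu.length - e
decreasing_by omega

theorem le_runEnd (mu : List Int) (pos e : Nat) : e ≤ runEnd mu pos e := by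
  rw [runEnd]
  split
  · have := le_runEnd mu pos (e + 1); omega
  · omega
termination_by mu.length - e
decreasing_by omega

-- outer while loop of Source B, accumulating out
def altGo (mu idx : List Int) (pos : Nat) (out : List Int) : List Int :=
  if pos < mu.length then
    altGo mu idx (runEnd mu pos pos + 1) (out ++ [idx.getD (runEnd mu pos pos) 0])
  else out
termination_by mu.length - pos
decreasing_by have := le_runEnd mu pos pos; omega

def return_last_mu_index_alt (R1_four : List (String × List Int)) : List Int :=
  let mu := (R1_four.lookup "mu_id").getD []
  if mu = [] then []
  else
    let idx := (R1_four.lookup "index").getD []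
    altGo mu idx 0 []

-- ===== PRECONDITION & SPEC =====
-- Pre_ = exactly the inputs where the Python A returns: key 'mu_id' present (else KeyError), and
-- if mu_id is nonempty also 'index' present and at least as long (else KeyError / IndexError at
-- the last row); A never touches 'index' when mu_id is empty.
def Pre_return_last_mu_index (R1_four : List (String × List Int)) : Prop :=
  (R1_four.lookup "mu_id").isSome = true ∧
  (((R1_four.lookup "mu_id").getD [] = []) ∨
    ((R1_four.lookup "index").isSome = true ∧
      ((R1_four.lookup "mu_id").getD []).length ≤ ((R1_four.lookup "index").getD []).length))
instance (R1_four : List (String × List Int)) : Decidable (Pre_return_last_mu_index R1_four) := by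
  unfold Pre_return_last_mu_index; infer_instance

def pvWitness_return_last_mu_index : (List (String × List Int)) :=
  [("mu_id", [1, 1, 2]), ("index", [10, 11, 12])]

def Spec_return_last_mu_index (R1_four : List (String × List Int)) (out : List Int) : Prop := out = return_last_mu_index_alt R1_four
instance (R1_four : List (String × List Int)) (out : List Int) : Decidable (Spec_return_last_mu_index R1_four out) := by unfold Spec_return_last_mu_index; infer_instance

-- ===== CLAIM (what is proved, stated in full; the proofs are below) =====
def Claim_equal_return_last_mu_index : Prop := ∀ (R1_four : List (String × List Int)), Dom_return_last_mu_index R1_four → Pre_return_last_mu_index R1_four → Spec_return_last_mu_index R1_four (return_last_mu_index R1_four)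

-- ===== LEMMAS AND PROOFS =====

-- per-row contribution of A's loop body, in Nat form
def aRow (mu idx : List Int) (k : Nat) : List Int :=
  (if k + 1 < mu.length then
     if mu.getD k 0 ≠ mu.getD (k + 1) 0 then [idx.getD k 0] else []
   else []) ++
  (if k + 1 = mu.length then [idx.getD k 0] else [])

theorem aBody_cast (mu idx acc : List Int) (k : Nat) :
    aBody mu idx acc (k : Int) = acc ++ aRow mu idx k := by
  unfold aBody aRow
  have hc : ((k : Int) + 1) = ((k + 1 : Nat) : Int) := by push_cast; ring
  simp only [hc, PySem.List.pyGetD_natCast]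
  split_ifs <;> simp_all <;> omega

-- A's foldl over range(n) collects the per-row contributions
theorem foldA (mu idx : List Int) (n : Nat) (acc : List Int) :
    (PySem.List.pyRange 0 (n : Int) 1).foldl (aBody mu idx) acc =
      acc ++ (List.range n).flatMap (aRow mu idx) := by
  induction n generalizing acc with
  | zero => simp [PySem.List.pyRange_one_eq_nil]
  | succ m ih =>
    have hc : ((m + 1 : Nat) : Int) = (m : Int) + 1 := by push_cast; ring
    rw [hc, PySem.List.pyRange_one_succ_right (by positivity), List.foldl_append, ih]
    simp only [List.foldl_cons, List.foldl_nil, aBody_cast]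
    rw [List.range_succ]
    simp

-- A's rows pos, pos+1, …, n-1 concatenated, recursively
def arows (mu idx : List Int) (pos : Nat) : List Int :=
  if pos < mu.length then aRow mu idx pos ++ arows mu idx (pos + 1)
  else []
termination_by mu.length - pos
decreasing_by omega

theorem flatMap_range'_eq_arows (mu idx : List Int) (pos cnt : Nat)
    (hcnt : pos + cnt = mu.length) :
    (List.range' pos cnt).flatMap (aRow mu idx) = arows mu idx pos := by
  induction cnt generalizing pos with
  | zero => rw [arows, if_neg (by omega)]; rfl
  | succ m ih =>
    rw [List.range'_succ, List.flatMap_cons, arows, if_pos (by omega),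
      ih (pos + 1) (by omega)]

theorem aRow_boundary (mu idx : List Int) (k : Nat) (hk : k < mu.length)
    (hb : k + 1 = mu.length ∨ mu.getD k 0 ≠ mu.getD (k + 1) 0) :
    aRow mu idx k = [idx.getD k 0] := by
  unfold aRow
  by_cases h1 : k + 1 < mu.length
  · have hne : mu.getD k 0 ≠ mu.getD (k + 1) 0 := by
      rcases hb with hb | hb
      · omega
      · exact hb
    rw [if_pos h1, if_pos hne, if_neg (show ¬ k + 1 = mu.length by omega)]
    simp
  · rw [if_neg h1, if_pos (show k + 1 = mu.length by omega)]
    simp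

theorem aRow_inner (mu idx : List Int) (k : Nat) (hk : k + 1 < mu.length)
    (he : mu.getD k 0 = mu.getD (k + 1) 0) :
    aRow mu idx k = [] := by
  unfold aRow
  rw [if_pos hk, if_neg (fun h => h he), if_neg (show ¬ k + 1 = mu.length by omega)]
  simp

-- the run starting at pos: rows e..runEnd-1 contribute nothing, runEnd contributes its index
theorem run_lemma (mu idx : List Int) (pos e : Nat) (hpe : pos ≤ e) (he : e < mu.length)
    (hv : mu.getD e 0 = mu.getD pos 0) :
    arows mu idx e = idx.getD (runEnd mu pos e) 0 :: arows mu idx (runEnd mu pos e + 1) := by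
  rw [runEnd]
  split
  · rename_i h
    have ih := run_lemma mu idx pos (e + 1) (by omega) h.1 h.2
    rw [arows, if_pos he, aRow_inner mu idx e h.1 (by rw [hv, ← h.2]), List.nil_append, ih]
  · rename_i h
    have hb : e + 1 = mu.length ∨ mu.getD e 0 ≠ mu.getD (e + 1) 0 := by
      by_cases h1 : e + 1 < mu.length
      · right; intro hc; exact h ⟨h1, by rw [← hc, hv]⟩
      · left; omega
    conv_lhs => rw [arows]
    rw [if_pos he, aRow_boundary mu idx e he hb, List.singleton_append]
termination_by mu.length - e
decreasing_by omega

theorem altGo_acc (mu idx : List Int) (pos : Nat) (out : List Int) :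
    altGo mu idx pos out = out ++ altGo mu idx pos [] := by
  conv_lhs => rw [altGo]
  conv_rhs => rw [altGo]
  by_cases h : pos < mu.length
  · rw [if_pos h, if_pos h,
      altGo_acc mu idx (runEnd mu pos pos + 1) (out ++ [idx.getD (runEnd mu pos pos) 0]),
      altGo_acc mu idx (runEnd mu pos pos + 1) ([] ++ [idx.getD (runEnd mu pos pos) 0])]
    simp
  · rw [if_neg h, if_neg h]; simp
termination_by mu.length - pos
decreasing_by all_goals have := le_runEnd mu pos pos; omega

theorem arows_eq_altGo (mu idx : List Int) (pos : Nat) :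
    arows mu idx pos = altGo mu idx pos [] := by
  by_cases h : pos < mu.length
  · rw [run_lemma mu idx pos pos (le_refl pos) h rfl]
    conv_rhs => rw [altGo]
    rw [if_pos h, altGo_acc, arows_eq_altGo mu idx (runEnd mu pos pos + 1)]
    simp
  · rw [arows, if_neg h]
    conv_rhs => rw [altGo]
    rw [if_neg h]
termination_by mu.length - pos
decreasing_by have := le_runEnd mu pos pos; omega

-- ===== VERDICT (by name: the statement is the Claim_ definition above) =====
theorem return_last_mu_index_spec : Claim_equal_return_last_mu_index := by
  intro R1_four _ _
  unfold Spec_return_last_mu_index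
  simp only [return_last_mu_index, return_last_mu_index_alt]
  set mu := (R1_four.lookup "mu_id").getD [] with hmu
  set idx := (R1_four.lookup "index").getD [] with hidx
  rw [foldA mu idx mu.length [], List.nil_append, List.range_eq_range',
    flatMap_range'_eq_arows mu idx 0 mu.length (by omega), arows_eq_altGo]
  by_cases h : mu = []
  · rw [if_pos h]
    conv_lhs => rw [altGo]
    rw [if_neg (by simp [h])]
  · rw [if_neg h]
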